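-- pv_equiv track=rewrite | github.com/Muxucao0812/ScaleOutKeyswitch | CinnamonHLS/python/cinnamon_fpga/parser.py | _select_ntt_span
-- ===== SOURCE A (Python) =====
-- _MAX_NTT_SPAN = 64
--
-- def _is_power_of_two(value: int) -> bool:
--     v = int(value)
--     return v > 0 and (v & (v - 1)) == 0
--
-- def _select_ntt_span(imm0: int, register_count: int) -> int:
--     mod = _MAX_NTT_SPAN + 1
--     signed = int(imm0)
--     span = (signed % mod) if signed >= 0 else ((-signed) % mod)
--     if span < 2 or (not _is_power_of_two(span)):
--         if register_count >= 8:
--             span = 8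
--         elif register_count >= 4:
--             span = 4
--         else:
--             span = 2
--     while span > register_count and span > 2:
--         span >>= 1
--     return span
-- ===== SOURCE B (Python) =====
-- def _select_ntt_span(imm0: int, register_count: int) -> int:
--     span = abs(int(imm0)) % 65
--     if span < 2 or (span & (span - 1)) != 0:
--         span = 8 if register_count >= 8 else (4 if register_count >= 4 else 2)
--     cap = (1 << (register_count.bit_length() - 1)) if register_count >= 1 else 0
--     return min(span, max(2, cap))
-- ===== Notes on version B (the rewrite author's own statement) =====
-- stated objective: simpler
-- what changed: The halving while-loop is replaced by a closed form: the result is min(span, max(2, largest power of two not exceeding register_count)) computed via bit_length, so the iterative shifting disappears.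
import Mathlib
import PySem

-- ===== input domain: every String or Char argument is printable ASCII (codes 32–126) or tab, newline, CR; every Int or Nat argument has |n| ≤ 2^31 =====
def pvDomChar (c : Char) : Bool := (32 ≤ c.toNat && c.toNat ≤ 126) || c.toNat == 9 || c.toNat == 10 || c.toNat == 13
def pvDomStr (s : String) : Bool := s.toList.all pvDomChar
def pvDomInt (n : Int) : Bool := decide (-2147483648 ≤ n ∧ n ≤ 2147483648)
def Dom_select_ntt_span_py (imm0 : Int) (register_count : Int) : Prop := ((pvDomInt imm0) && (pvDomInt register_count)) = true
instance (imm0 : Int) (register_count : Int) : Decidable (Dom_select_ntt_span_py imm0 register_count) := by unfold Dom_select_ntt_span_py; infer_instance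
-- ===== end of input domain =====

-- B replaces A's halving while-loop by a closed form (min/max with the largest power of two ≤ register_count, via bit_length); return values proved equal on all inputs.

-- ===== PORT A =====

-- _is_power_of_two
def pvIsPowerOfTwo (value : Int) : Bool :=
  let v := value
  decide (v > 0) && (PySem.Int.band v (v - 1) == 0)

-- termination fact for the while loop: span >>= 1 strictly shrinks while span > 2
theorem pvShiftLt (span : Int) (h : span > 2) : (span >>> (1 : Nat)).toNat < span.toNat := by
  have h1 : span >>> (1 : Nat) = span / ((2 ^ 1 : Nat) : Int) := Int.shiftRight_eq_div_pow span 1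
  rw [h1]; omega

-- 'while span > register_count and span > 2: span >>= 1'
def pvLoopA (span register_count : Int) : Int :=
  if span > register_count ∧ span > 2 then pvLoopA (span >>> (1 : Nat)) register_count else span
termination_by span.toNat
decreasing_by exact pvShiftLt span (by omega)

def select_ntt_span_py (imm0 : Int) (register_count : Int) : Int :=
  let mod : Int := 64 + 1
  let signed : Int := imm0
  let span : Int := if signed ≥ 0 then PySem.Int.mod signed mod else PySem.Int.mod (-signed) mod
  let span : Int :=
    if span < 2 ∨ ¬ (pvIsPowerOfTwo span = true) then
      (if register_count ≥ 8 then 8 else if register_count ≥ 4 then 4 else 2)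
    else span
  pvLoopA span register_count

-- ===== PORT B =====
def select_ntt_span_py_alt (imm0 : Int) (register_count : Int) : Int :=
  let span : Int := PySem.Int.mod |imm0| 65
  let span : Int :=
    if span < 2 ∨ PySem.Int.band span (span - 1) ≠ 0 then
      (if register_count ≥ 8 then 8 else if register_count ≥ 4 then 4 else 2)
    else span
  -- register_count.bit_length() ported via PySem.Int.bitLength; 1 << k is Lean's <<<
  let cap : Int := if register_count ≥ 1 then (1 : Int) <<< (PySem.Int.bitLength register_count - 1) else 0
  min span (max 2 cap)

-- ===== PRECONDITION & SPEC =====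
def Spec_select_ntt_span_py (imm0 : Int) (register_count : Int) (out : Int) : Prop := out = select_ntt_span_py_alt imm0 register_count
instance (imm0 : Int) (register_count : Int) (out : Int) : Decidable (Spec_select_ntt_span_py imm0 register_count out) := by unfold Spec_select_ntt_span_py; infer_instance

-- ===== CLAIM (what is proved, stated in full; the proofs are below) =====
def Claim_equal_select_ntt_span_py : Prop := ∀ (imm0 : Int) (register_count : Int), Dom_select_ntt_span_py imm0 register_count → Spec_select_ntt_span_py imm0 register_count (select_ntt_span_py imm0 register_count)

-- ===== LEMMAS AND PROOFS =====

-- the closed-form cap from B, as a named helper for the proofs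
def pvCapB (register_count : Int) : Int :=
  if register_count ≥ 1 then (1 : Int) <<< (PySem.Int.bitLength register_count - 1) else 0

theorem pvCapB_eq_pow (rc : Int) (h : rc ≥ 1) :
    pvCapB rc = (2 : Int) ^ (PySem.Int.bitLength rc - 1) := by
  simp [pvCapB, h, Int.shiftLeft_eq]

theorem pvCapB_ge (rc : Int) (k : Nat) (h : (2 : Int) ^ k ≤ rc) : (2 : Int) ^ k ≤ pvCapB rc := by
  have h1 : rc ≥ 1 := le_trans (one_le_pow₀ (by norm_num)) h
  rw [pvCapB_eq_pow rc h1]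
  have hlt := PySem.Int.lt_two_pow_bitLength rc
  have hk : (2 : Nat) ^ k ≤ rc.natAbs := by
    have : ((2 : Nat) ^ k : Int) ≤ rc := by push_cast; exact h
    omega
  have hkb : k < PySem.Int.bitLength rc := by
    by_contra hc
    push Not at hc
    have := Nat.pow_le_pow_right (by norm_num : 1 ≤ 2) hc
    omega
  exact pow_le_pow_right₀ (by norm_num) (by omega)

theorem pvCapB_lt (rc : Int) (k : Nat) (h : rc < (2 : Int) ^ (k + 1)) : pvCapB rc ≤ (2 : Int) ^ k := by
  by_cases h1 : rc ≥ 1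
  · rw [pvCapB_eq_pow rc h1]
    have h2 := PySem.Int.two_pow_bitLength_le rc (by omega)
    have hb : PySem.Int.bitLength rc - 1 ≤ k := by
      by_contra hc
      push Not at hc
      have hp : (2 : Nat) ^ (k + 1) ≤ 2 ^ (PySem.Int.bitLength rc - 1) :=
        Nat.pow_le_pow_right (by norm_num) hc
      have : ((2 : Nat) ^ (k + 1) : Int) ≤ rc := by
        have : (2 : Nat) ^ (k + 1) ≤ rc.natAbs := le_trans hp h2
        omega
      push_cast at this
      omega
    exact pow_le_pow_right₀ (by norm_num) hb
  · simp [pvCapB, h1]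

theorem pvLoopA_pow (rc : Int) (k : Nat) :
    pvLoopA ((2 : Int) ^ (k + 1)) rc = min ((2 : Int) ^ (k + 1)) (max 2 (pvCapB rc)) := by
  induction k with
  | zero =>
    rw [pvLoopA]
    norm_num
  | succ k ih =>
    rw [pvLoopA]
    by_cases hge : (2 : Int) ^ (k + 1 + 1) ≤ rc
    · rw [if_neg (by omega)]
      have hc := pvCapB_ge rc (k + 1 + 1) hge
      have h2 : (2 : Int) ≤ (2 : Int) ^ (k + 1 + 1) := by
        calc (2 : Int) = 2 ^ 1 := by norm_num
        _ ≤ 2 ^ (k + 1 + 1) := pow_le_pow_right₀ (by norm_num) (by omega)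
      omega
    · have h2 : (2 : Int) < (2 : Int) ^ (k + 1 + 1) := by
        calc (2 : Int) = 2 ^ 1 := by norm_num
        _ < 2 ^ (k + 1 + 1) := pow_lt_pow_right₀ (by norm_num) (by omega)
      rw [if_pos ⟨by omega, by omega⟩]
      have hs : ((2 : Int) ^ (k + 1 + 1)) >>> (1 : Nat) = (2 : Int) ^ (k + 1) := by
        rw [Int.shiftRight_eq_div_pow]
        push_cast
        rw [pow_succ]
        exact Int.mul_ediv_cancel _ (by norm_num)
      rw [hs, ih]
      have hc := pvCapB_lt rc (k + 1) (by omega)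
      have h3 : (2 : Int) ≤ (2 : Int) ^ (k + 1) := by
        calc (2 : Int) = 2 ^ 1 := by norm_num
        _ ≤ 2 ^ (k + 1) := pow_le_pow_right₀ (by norm_num) (by omega)
      have h4 : (2 : Int) ^ (k + 1) ≤ 2 ^ (k + 1 + 1) := pow_le_pow_right₀ (by norm_num) (by omega)
      omega

-- ===== VERDICT (by name: the statement is the Claim_ definition above) =====
-- Nat classification: a power of two in [2,65) is one of 2,4,8,16,32,64
theorem pvPow2Classify (n : Nat) (h : n < 65) (h2 : 2 ≤ n) (hb : n &&& (n - 1) = 0) :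
    n = 2 ∨ n = 4 ∨ n = 8 ∨ n = 16 ∨ n = 32 ∨ n = 64 := by
  revert h2 hb
  revert h
  revert n
  decide

theorem pvMain (imm0 rc : Int) : select_ntt_span_py imm0 rc = select_ntt_span_py_alt imm0 rc := by
  unfold select_ntt_span_py select_ntt_span_py_alt
  dsimp only
  rw [show (if rc ≥ 1 then (1 : Int) <<< (PySem.Int.bitLength rc - 1) else 0) = pvCapB rc from rfl]
  have hspan0 : (if imm0 ≥ 0 then PySem.Int.mod imm0 (64 + 1) else PySem.Int.mod (-imm0) (64 + 1))
      = PySem.Int.mod |imm0| 65 := by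
    by_cases h : imm0 ≥ 0
    · rw [if_pos h, abs_of_nonneg h]; norm_num
    · rw [if_neg h, abs_of_neg (by omega)]; norm_num
  rw [hspan0]
  have hmod : PySem.Int.mod |imm0| 65 = |imm0| % 65 := PySem.Int.mod_eq_emod_of_pos (by norm_num)
  obtain ⟨s0, hs0⟩ : ∃ s0 : Int, PySem.Int.mod |imm0| 65 = s0 := ⟨_, rfl⟩
  rw [hs0]
  rw [hs0] at hmod
  have hlo : 0 ≤ s0 := by rw [hmod]; exact Int.emod_nonneg _ (by norm_num)
  have hhi : s0 < 65 := by rw [hmod]; exact Int.emod_lt_of_pos _ (by norm_num)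
  clear hmod hs0 hspan0
  by_cases hcond : s0 < 2 ∨ PySem.Int.band s0 (s0 - 1) ≠ 0
  · have hcondA : s0 < 2 ∨ ¬ (pvIsPowerOfTwo s0 = true) := by
      rcases hcond with h | h
      · exact Or.inl h
      · right; simp [pvIsPowerOfTwo]; intro _; exact h
    rw [if_pos hcondA, if_pos hcond]
    split_ifs with h8 h4
    · simpa using pvLoopA_pow rc 2
    · simpa using pvLoopA_pow rc 1
    · simpa using pvLoopA_pow rc 0
  · have hcondA : ¬ (s0 < 2 ∨ ¬ (pvIsPowerOfTwo s0 = true)) := by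
      push Not at hcond ⊢
      refine ⟨hcond.1, ?_⟩
      simp [pvIsPowerOfTwo]
      exact ⟨by omega, hcond.2⟩
    rw [if_neg hcondA, if_neg hcond]
    push Not at hcond
    obtain ⟨hge2, hband⟩ := hcond
    obtain ⟨n, rfl⟩ : ∃ n : Nat, s0 = (n : Int) := ⟨s0.toNat, by omega⟩
    rw [show ((n : Int) - 1) = ((n - 1 : Nat) : Int) by omega, PySem.Int.band_natCast] at hband
    have hband' : n &&& (n - 1) = 0 := by exact_mod_cast hband
    have hcls := pvPow2Classify n (by omega) (by omega) hband'
    rcases hcls with h | h | h | h | h | h <;> subst h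
    · simpa using pvLoopA_pow rc 0
    · simpa using pvLoopA_pow rc 1
    · simpa using pvLoopA_pow rc 2
    · simpa using pvLoopA_pow rc 3
    · simpa using pvLoopA_pow rc 4
    · simpa using pvLoopA_pow rc 5

theorem select_ntt_span_py_spec : Claim_equal_select_ntt_span_py := by
  intro imm0 rc _
  exact pvMain imm0 rc
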